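-- pv_equiv track=rewrite | github.com/boburabdumalikov777-web/pythondan-vazifalar | edabit.py/easy.py/12-11/46.py | war_of_numbers
-- ===== SOURCE A (Python) =====
-- def war_of_numbers(lst):
--     a=0
--     b=0
--     for x in lst:
--         if x%2==0:
--             a+=x
--         else:
--             b+=x
--     if a>b:
--         c=a-b
--     else:
--         c=b-a
--     return c
-- ===== SOURCE B (Python) =====
-- def war_of_numbers(lst):
--     total = sum(lst)
--     odd = sum(x for x in lst if x % 2)
--     return abs(total - 2 * odd)
-- ===== Notes on version B (the rewrite author's own statement) =====
-- stated objective: simpler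
-- what changed: B does not maintain even/odd accumulators at all: it computes the overall sum in one pass and the sum of the odd elements in a second filtered pass, then uses the identity evens - odds = total - 2*odds and abs instead of A's comparison branch.
import Mathlib
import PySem

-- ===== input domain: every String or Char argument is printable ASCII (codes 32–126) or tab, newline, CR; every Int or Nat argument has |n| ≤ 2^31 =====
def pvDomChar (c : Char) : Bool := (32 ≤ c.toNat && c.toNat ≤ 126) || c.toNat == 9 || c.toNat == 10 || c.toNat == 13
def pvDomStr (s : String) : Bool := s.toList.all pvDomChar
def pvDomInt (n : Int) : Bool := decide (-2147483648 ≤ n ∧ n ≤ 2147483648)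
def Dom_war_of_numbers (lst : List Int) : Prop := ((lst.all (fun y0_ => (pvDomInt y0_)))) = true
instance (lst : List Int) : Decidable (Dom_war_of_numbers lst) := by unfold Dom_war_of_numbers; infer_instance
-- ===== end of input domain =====

-- B drops the even/odd accumulators: two staged passes compute the overall sum and the odd-element
-- sum, then the identity evens - odds = total - 2*odds plus abs replaces A's comparison branch (simpler).
-- ===== PORT A =====
def war_of_numbers (lst : List Int) : Int :=
  let ab := lst.foldl (fun (p : Int × Int) x =>
    if PySem.Int.mod x 2 == 0 then (p.1 + x, p.2) else (p.1, p.2 + x)) (0, 0)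
  if ab.1 > ab.2 then ab.1 - ab.2 else ab.2 - ab.1

-- ===== PORT B =====
def war_of_numbers_alt (lst : List Int) : Int :=
  let total := lst.foldl (· + ·) 0
  let odd := (lst.filter (fun x => PySem.Int.mod x 2 != 0)).foldl (· + ·) 0
  |total - 2 * odd|

-- ===== PRECONDITION & SPEC =====
def Spec_war_of_numbers (lst : List Int) (out : Int) : Prop := out = war_of_numbers_alt lst
instance (lst : List Int) (out : Int) : Decidable (Spec_war_of_numbers lst out) := by unfold Spec_war_of_numbers; infer_instance

-- ===== CLAIM (what is proved, stated in full; the proofs are below) =====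
def Claim_equal_war_of_numbers : Prop := ∀ (lst : List Int), Dom_war_of_numbers lst → Spec_war_of_numbers lst (war_of_numbers lst)

-- ===== LEMMAS AND PROOFS =====
-- a fold of (+) from s is s plus the list sum
theorem wsum_foldl (l : List Int) : ∀ (s : Int), l.foldl (· + ·) s = s + l.sum := by
  induction l with
  | nil => intro s; simp
  | cons x xs ih => intro s; simp only [List.foldl_cons, ih, List.sum_cons]; ring

-- A's pair fold from (a, b) lands at (a + Σ evens, b + Σ odds)
theorem wa_pairfold (lst : List Int) : ∀ (a b : Int),
    lst.foldl (fun (p : Int × Int) x =>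
      if PySem.Int.mod x 2 == 0 then (p.1 + x, p.2) else (p.1, p.2 + x)) (a, b)
    = (a + ((lst.filter (fun x => PySem.Int.mod x 2 == 0)).sum),
       b + ((lst.filter (fun x => PySem.Int.mod x 2 != 0)).sum)) := by
  induction lst with
  | nil => intro a b; simp
  | cons x xs ih =>
    intro a b
    by_cases h : PySem.Int.mod x 2 == 0
    · have h2 : (PySem.Int.mod x 2 != 0) = false := by rw [bne, h]; rfl
      simp only [List.foldl_cons, ih, List.filter_cons, h, h2,
        Bool.false_eq_true, if_true, if_false, List.sum_cons]
      simp only [Prod.mk.injEq]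
      exact ⟨by ring, trivial⟩
    · have hb : (PySem.Int.mod x 2 == 0) = false := by simpa using h
      have h2 : (PySem.Int.mod x 2 != 0) = true := by rw [bne, hb]; rfl
      simp only [List.foldl_cons, ih, List.filter_cons, hb, h2,
        Bool.false_eq_true, if_true, if_false, List.sum_cons]
      simp only [Prod.mk.injEq]
      exact ⟨trivial, by ring⟩

-- the even and odd filters partition the sum
theorem wpart (lst : List Int) :
    (lst.filter (fun x => PySem.Int.mod x 2 == 0)).sum
      + (lst.filter (fun x => PySem.Int.mod x 2 != 0)).sum = lst.sum := by
  induction lst with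
  | nil => simp
  | cons x xs ih =>
    by_cases h : PySem.Int.mod x 2 == 0
    · have h2 : (PySem.Int.mod x 2 != 0) = false := by rw [bne, h]; rfl
      simp only [List.filter_cons, h, h2, Bool.false_eq_true, if_true, if_false, List.sum_cons]
      omega
    · have hb : (PySem.Int.mod x 2 == 0) = false := by simpa using h
      have h2 : (PySem.Int.mod x 2 != 0) = true := by rw [bne, hb]; rfl
      simp only [List.filter_cons, hb, h2, Bool.false_eq_true, if_true, if_false, List.sum_cons]
      omega

-- ===== VERDICT (by name: the statement is the Claim_ definition above) =====
theorem war_of_numbers_spec : Claim_equal_war_of_numbers := by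
  intro lst _
  unfold Spec_war_of_numbers war_of_numbers war_of_numbers_alt
  rw [wa_pairfold lst 0 0, wsum_foldl lst 0,
      wsum_foldl (lst.filter (fun x => PySem.Int.mod x 2 != 0)) 0]
  have hpart := wpart lst
  simp only [zero_add]
  set e := (lst.filter (fun x => PySem.Int.mod x 2 == 0)).sum with he
  set o := (lst.filter (fun x => PySem.Int.mod x 2 != 0)).sum with ho
  have hs : lst.sum = e + o := by omega
  rw [hs]
  have : e + o - 2 * o = e - o := by ring
  rw [this]
  split_ifs with hab
  · rw [abs_of_pos (by omega : (0:Int) < e - o)]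
  · rw [abs_of_nonpos (by omega : e - o ≤ (0:Int))]; ring
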